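-- pv_equiv track=rewrite | github.com/sanket-desai/exogenousanalysis | LongestCommonDNAFragment.py | topcs
-- ===== SOURCE A (Python) =====
-- def topcs(S,T,x):
--     m = len(S)
--     n = len(T)
--     counter = [[0]*(n+1) for x in range(m+1)]
--     longest = 0
--     lcs_set = set()
--     for i in range(m):
--         for j in range(n):
--             if S[i] == T[j]:
--                 c = counter[i][j] + 1
--                 counter[i+1][j+1] = c
--                 if c >=x:
--                     #lcs_set = set()
--                     longest = c
--                     lcs_set.add(S[i-c+1:i+1])
--                 #elif c == longest:
--                 #lcs_set.add(S[i-c+1:i+1])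
--     return lcs_set
-- ===== SOURCE B (Python) =====
-- def topcs(S, T, x):
--     # Table-free rewrite: compute each common-suffix run length by a direct
--     # backward scan instead of the DP counter table.
--     lcs_set = set()
--     for i in range(len(S)):
--         for j in range(len(T)):
--             if S[i] == T[j]:
--                 c = 1
--                 while c <= i and c <= j and S[i - c] == T[j - c]:
--                     c += 1
--                 if c >= x:
--                     lcs_set.add(S[i - c + 1:i + 1])
--     return lcs_set
-- ===== Notes on version B (the rewrite author's own statement) =====
-- stated objective: alternative
-- what changed: B drops A's (m+1)x(n+1) DP counter table (and the dead 'longest' variable) and instead computes each common-suffix run length on the spot with a direct backward character scan at every matching pair.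
import Mathlib
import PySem

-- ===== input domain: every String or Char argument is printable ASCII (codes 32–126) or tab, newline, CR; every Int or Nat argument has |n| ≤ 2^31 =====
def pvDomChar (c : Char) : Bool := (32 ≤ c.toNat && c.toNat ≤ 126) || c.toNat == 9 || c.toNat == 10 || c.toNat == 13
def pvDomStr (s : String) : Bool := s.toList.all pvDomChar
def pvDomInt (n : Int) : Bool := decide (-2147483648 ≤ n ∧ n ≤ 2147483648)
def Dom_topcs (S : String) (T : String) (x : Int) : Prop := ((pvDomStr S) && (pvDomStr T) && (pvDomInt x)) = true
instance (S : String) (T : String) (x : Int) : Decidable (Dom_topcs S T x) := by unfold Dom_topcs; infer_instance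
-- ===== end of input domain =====

-- B replaces A's (m+1)×(n+1) DP counter table by a direct backward scan computing each
-- common-suffix run length on the spot; same returned set (alternative, not faster).

-- ===== PORT A =====
-- counter[a][b] read/write: indices are always in range in A, so List.getD/List.set are exact.
def pvEntry (cnt : List (List Int)) (a b : Nat) : Int := (cnt.getD a []).getD b 0

-- body of A's inner loop over j (state = (counter, longest, lcs_set))
def pvStepA (s t : List Char) (x : Int) (i : Nat)
    (st : List (List Int) × Int × List String) (j : Nat) :
    List (List Int) × Int × List String :=
  if s.getD i ' ' = t.getD j ' ' then
    let c : Int := pvEntry st.1 i j + 1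
    let cnt' := st.1.set (i+1) ((st.1.getD (i+1) []).set (j+1) c)
    if c ≥ x then
      (cnt', c, PySem.Set.add st.2.2
        (String.ofList (PySem.List.slice s (some ((i : Int) - c + 1)) (some ((i : Int) + 1)))))
    else (cnt', st.2.1, st.2.2)
  else st

def topcs (S : String) (T : String) (x : Int) : List String :=
  let s := S.toList
  let t := T.toList
  let m := s.length
  let n := t.length
  let init : List (List Int) × Int × List String :=
    (List.replicate (m+1) (List.replicate (n+1) 0), 0, PySem.Set.empty)
  ((List.range m).foldl (fun st i => (List.range n).foldl (pvStepA s t x i) st) init).2.2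

-- ===== PORT B =====
-- B's while loop: extend c while c <= i, c <= j and S[i-c] == T[j-c]
def pvRun (s t : List Char) (i j c : Nat) : Nat :=
  if c ≤ i ∧ c ≤ j ∧ s.getD (i - c) ' ' = t.getD (j - c) ' ' then pvRun s t i j (c+1) else c
termination_by i + 1 - c
decreasing_by omega

-- body of B's inner loop over j (state = lcs_set only)
def pvStepB (s t : List Char) (x : Int) (i : Nat) (acc : List String) (j : Nat) : List String :=
  if s.getD i ' ' = t.getD j ' ' then
    let c : Int := (pvRun s t i j 1 : Int)
    if c ≥ x then
      PySem.Set.add acc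
        (String.ofList (PySem.List.slice s (some ((i : Int) - c + 1)) (some ((i : Int) + 1))))
    else acc
  else acc

def topcs_alt (S : String) (T : String) (x : Int) : List String :=
  let s := S.toList
  let t := T.toList
  (List.range s.length).foldl
    (fun acc i => (List.range t.length).foldl (pvStepB s t x i) acc) PySem.Set.empty

-- ===== PRECONDITION & SPEC =====
def Spec_topcs (S : String) (T : String) (x : Int) (out : List String) : Prop := out = topcs_alt S T x
instance (S : String) (T : String) (x : Int) (out : List String) : Decidable (Spec_topcs S T x out) := by unfold Spec_topcs; infer_instance

-- ===== CLAIM (what is proved, stated in full; the proofs are below) =====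
def Claim_equal_topcs : Prop := ∀ (S : String) (T : String) (x : Int), Dom_topcs S T x → Spec_topcs S T x (topcs S T x)

-- ===== LEMMAS AND PROOFS =====

-- the DP recurrence A's counter table tabulates: length of the common suffix of s[:i] and t[:j]
def pvExt (s t : List Char) : Nat → Nat → Nat
  | 0, _ => 0
  | _+1, 0 => 0
  | i+1, j+1 => if s.getD i ' ' = t.getD j ' ' then pvExt s t i j + 1 else 0

theorem pvExt_le (s t : List Char) : ∀ i j, pvExt s t i j ≤ i ∧ pvExt s t i j ≤ j := by
  intro i
  induction i with
  | zero => intro j; simp [pvExt]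
  | succ i ih =>
    intro j
    cases j with
    | zero => simp [pvExt]
    | succ j =>
      have := ih j
      simp only [pvExt]
      split <;> omega

theorem pvExt_match (s t : List Char) :
    ∀ i j k, k < pvExt s t (i+1) (j+1) → s.getD (i - k) ' ' = t.getD (j - k) ' ' := by
  intro i
  induction i with
  | zero =>
    intro j k hk
    simp only [pvExt] at hk
    split at hk
    · have := (pvExt_le s t 0 j).1
      interval_cases k
      · simpa using ‹_›
    · omega
  | succ i ih =>
    intro j k hk
    simp only [pvExt] at hk
    split at hk
    · cases k with
      | zero => simpa using ‹_›
      | succ k =>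
        cases j with
        | zero => simp [pvExt] at hk
        | succ j =>
          have := ih j k (by omega)
          simpa [Nat.succ_sub_succ] using this
    · omega

theorem pvExt_zero_right (s t : List Char) (i : Nat) : pvExt s t (i+1) 0 = 0 := rfl

theorem pvExt_zero_left (s t : List Char) (j : Nat) : pvExt s t 0 j = 0 := by
  cases j <;> rfl

theorem pvExt_succ (s t : List Char) (i j : Nat) :
    pvExt s t (i+1) (j+1) = if s.getD i ' ' = t.getD j ' ' then pvExt s t i j + 1 else 0 := rfl

theorem pvExt_stop (s t : List Char) :
    ∀ i j, pvExt s t (i+1) (j+1) ≤ i → pvExt s t (i+1) (j+1) ≤ j →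
      s.getD (i - pvExt s t (i+1) (j+1)) ' ' ≠ t.getD (j - pvExt s t (i+1) (j+1)) ' ' := by
  intro i
  induction i with
  | zero =>
    intro j h1 h2
    by_cases hm : s.getD 0 ' ' = t.getD j ' '
    · exfalso
      rw [pvExt_succ, if_pos hm, pvExt_zero_left] at h1
      omega
    · rw [pvExt_succ, if_neg hm] at h1 h2 ⊢
      simpa using hm
  | succ i ih =>
    intro j h1 h2
    by_cases hm : s.getD (i+1) ' ' = t.getD j ' '
    · rw [pvExt_succ, if_pos hm] at h1 h2 ⊢
      cases j with
      | zero =>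
        exfalso
        rw [pvExt_zero_right] at h2
        omega
      | succ j =>
        have := ih j (by omega) (by omega)
        simpa [Nat.succ_sub_succ] using this
    · rw [pvExt_succ, if_neg hm] at h1 h2 ⊢
      simpa using hm

theorem pvRun_eq (s t : List Char) (i j : Nat) :
    ∀ d c, 1 ≤ c → c ≤ pvExt s t (i+1) (j+1) → pvExt s t (i+1) (j+1) - c = d →
      pvRun s t i j c = pvExt s t (i+1) (j+1) := by
  intro d
  induction d with
  | zero =>
    intro c hc1 hc2 hd
    have hceq : c = pvExt s t (i+1) (j+1) := by omega
    rw [pvRun]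
    have hle := pvExt_le s t (i+1) (j+1)
    split
    · exfalso
      rcases ‹_ ∧ _ ∧ _› with ⟨h1, h2, h3⟩
      exact pvExt_stop s t i j (by omega) (by omega) (by rw [← hceq]; exact h3)
    · omega
  | succ d ih =>
    intro c hc1 hc2 hd
    rw [pvRun]
    have hle := pvExt_le s t (i+1) (j+1)
    have hm := pvExt_match s t i j c (by omega)
    rw [if_pos ⟨by omega, by omega, hm⟩]
    exact ih (c+1) (by omega) (by omega) (by omega)

-- the single c computed by A's table at a matching cell equals B's backward scan
theorem pvRun_one_eq (s t : List Char) (i j : Nat)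
    (h : s.getD i ' ' = t.getD j ' ') :
    pvRun s t i j 1 = pvExt s t (i+1) (j+1) := by
  have : 1 ≤ pvExt s t (i+1) (j+1) := by
    simp only [pvExt]; rw [if_pos h]; omega
  exact pvRun_eq s t i j (pvExt s t (i+1) (j+1) - 1) 1 le_rfl this rfl

-- table shape and correctness invariant
def pvShape (n m' : Nat) (cnt : List (List Int)) : Prop :=
  cnt.length = m' ∧ ∀ r ∈ cnt, r.length = n + 1

def pvGood (s t : List Char) (i j : Nat) (cnt : List (List Int)) : Prop :=
  ∀ a b, a ≤ s.length → b ≤ t.length →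
    pvEntry cnt a b = if a ≤ i ∨ (a = i + 1 ∧ b ≤ j) then (pvExt s t a b : Int) else 0

theorem pvEntry_set (cnt : List (List Int)) (n : Nat) (hs : pvShape n (cnt.length) cnt)
    (i j : Nat) (hi : i < cnt.length) (hj : j ≤ n) (c : Int) (a b : Nat) (hb : b ≤ n) :
    pvEntry (cnt.set i ((cnt.getD i []).set j c)) a b
      = if a = i ∧ b = j then c else pvEntry cnt a b := by
  have hrow : (cnt[i]?.getD []).length = n + 1 := by
    rw [List.getElem?_eq_getElem hi]
    exact hs.2 _ (List.getElem_mem _)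
  unfold pvEntry
  simp only [List.getD_eq_getElem?_getD, List.getElem?_set]
  by_cases hai : i = a
  · subst hai
    rw [if_pos rfl, if_pos hi]
    simp only [Option.getD_some, List.getElem?_set]
    by_cases hbj : j = b
    · subst hbj
      rw [if_pos rfl, if_pos (by omega)]
      simp
    · rw [if_neg hbj, if_neg (fun h => hbj h.2.symm)]
  · rw [if_neg hai, if_neg (fun h => hai h.1.symm)]

theorem pvShape_set (cnt : List (List Int)) (n i j : Nat) (c : Int)
    (hs : pvShape n (cnt.length) cnt) (hi : i < cnt.length) :
    pvShape n (cnt.length) (cnt.set i ((cnt.getD i []).set j c)) := by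
  constructor
  · simp
  · intro r hr
    rcases List.mem_or_eq_of_mem_set hr with h | h
    · exact hs.2 _ h
    · subst h
      rw [List.length_set]
      apply hs.2
      rw [List.getD_eq_getElem?_getD, List.getElem?_eq_getElem hi]
      exact List.getElem_mem _

-- one inner step preserves the invariant and keeps the two accumulators equal
theorem pv_step (s t : List Char) (x : Int) (i j : Nat)
    (hi : i < s.length) (hj : j < t.length)
    (cnt : List (List Int)) (lg : Int) (acc : List String)
    (hs : pvShape t.length (s.length + 1) cnt) (hg : pvGood s t i j cnt) :
    pvShape t.length (s.length + 1) (pvStepA s t x i (cnt, lg, acc) j).1 ∧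
    pvGood s t i (j+1) (pvStepA s t x i (cnt, lg, acc) j).1 ∧
    (pvStepA s t x i (cnt, lg, acc) j).2.2 = pvStepB s t x i acc j := by
  have hlen : cnt.length = s.length + 1 := hs.1
  have hs' : pvShape t.length cnt.length cnt := by rw [hlen]; exact hs
  by_cases hm : s.getD i ' ' = t.getD j ' '
  · have hcij : pvEntry cnt i j = (pvExt s t i j : Int) := by
      rw [hg i j (by omega) (by omega), if_pos (by omega)]
    have hext : pvExt s t (i+1) (j+1) = pvExt s t i j + 1 := by
      rw [pvExt_succ, if_pos hm]
    have hc : pvEntry cnt i j + 1 = ((pvExt s t (i+1) (j+1) : Nat) : Int) := by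
      rw [hcij, hext]; push_cast; ring
    have hrun : ((pvRun s t i j 1 : Nat) : Int) = pvEntry cnt i j + 1 := by
      rw [hc, pvRun_one_eq s t i j hm]
    have hshape' := pvShape_set cnt t.length (i+1) (j+1) (pvEntry cnt i j + 1) hs' (by omega)
    rw [hlen] at hshape'
    have hgood' : pvGood s t i (j+1)
        (cnt.set (i+1) ((cnt.getD (i+1) []).set (j+1) (pvEntry cnt i j + 1))) := by
      intro a b ha hb
      rw [pvEntry_set cnt t.length hs' (i+1) (j+1) (by omega) (by omega) _ a b hb]
      by_cases hab : a = i + 1 ∧ b = j + 1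
      · rw [if_pos hab, if_pos (by omega), hab.1, hab.2, hc]
      · rw [if_neg hab, hg a b ha hb]
        by_cases h1 : a ≤ i ∨ (a = i + 1 ∧ b ≤ j)
        · rw [if_pos h1, if_pos (by omega)]
        · rw [if_neg h1, if_neg (by omega)]
    simp only [pvStepA, pvStepB]
    rw [if_pos hm, if_pos hm, hrun]
    by_cases hx : pvEntry cnt i j + 1 ≥ x
    · rw [if_pos hx, if_pos hx]
      exact ⟨hshape', hgood', rfl⟩
    · rw [if_neg hx, if_neg hx]
      exact ⟨hshape', hgood', rfl⟩
  · simp only [pvStepA, pvStepB]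
    rw [if_neg hm, if_neg hm]
    refine ⟨hs, ?_, rfl⟩
    intro a b ha hb
    rw [hg a b ha hb]
    by_cases h1 : a ≤ i ∨ (a = i + 1 ∧ b ≤ j)
    · rw [if_pos h1, if_pos (by omega)]
    · by_cases h2 : a = i + 1 ∧ b = j + 1
      · rw [if_neg h1, if_pos (by omega), h2.1, h2.2, pvExt_succ, if_neg hm]
        simp
      · rw [if_neg h1, if_neg (by omega)]

-- the inner fold over range k
theorem pv_inner (s t : List Char) (x : Int) (i : Nat) (hi : i < s.length) :
    ∀ k, k ≤ t.length → ∀ cnt lg acc,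
      pvShape t.length (s.length + 1) cnt → pvGood s t i 0 cnt →
      pvShape t.length (s.length + 1) ((List.range k).foldl (pvStepA s t x i) (cnt, lg, acc)).1 ∧
      pvGood s t i k ((List.range k).foldl (pvStepA s t x i) (cnt, lg, acc)).1 ∧
      ((List.range k).foldl (pvStepA s t x i) (cnt, lg, acc)).2.2
        = (List.range k).foldl (pvStepB s t x i) acc := by
  intro k
  induction k with
  | zero => intro _ cnt lg acc hs hg; exact ⟨hs, hg, rfl⟩
  | succ k ih =>
    intro hk cnt lg acc hs hg
    have ihk := ih (by omega) cnt lg acc hs hg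
    rw [List.range_succ, List.foldl_append, List.foldl_append]
    simp only [List.foldl_cons, List.foldl_nil]
    obtain ⟨hs', hg', hacc⟩ := ihk
    set st := (List.range k).foldl (pvStepA s t x i) (cnt, lg, acc) with hst
    have hstep := pv_step s t x i k hi (by omega) st.1 st.2.1 st.2.2 hs' hg'
    refine ⟨hstep.1, hstep.2.1, ?_⟩
    rw [← hacc]
    exact hstep.2.2

-- moving to the next outer row
theorem pvGood_next (s t : List Char) (i : Nat) (cnt : List (List Int))
    (hg : pvGood s t i t.length cnt) : pvGood s t (i+1) 0 cnt := by
  intro a b ha hb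
  rw [hg a b ha hb]
  by_cases h1 : a ≤ i ∨ (a = i + 1 ∧ b ≤ t.length)
  · rw [if_pos h1, if_pos (by rcases h1 with h | h; exact Or.inl (by omega); exact Or.inl (by omega))]
  · rw [if_neg h1]
    by_cases h2 : a = i + 2 ∧ b ≤ 0
    · rw [if_pos (Or.inr h2)]
      have hb0 : b = 0 := by omega
      subst hb0
      rcases Nat.exists_eq_add_of_lt (by omega : 0 < a) with ⟨a', rfl⟩
      simp [pvExt]
    · rw [if_neg (by rintro (h | h); exact h1 (by omega); exact h2 h)]

-- the outer fold over range k
theorem pv_outer (s t : List Char) (x : Int) :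
    ∀ k, k ≤ s.length →
      pvShape t.length (s.length + 1)
        ((List.range k).foldl (fun st i => (List.range t.length).foldl (pvStepA s t x i) st)
          (List.replicate (s.length+1) (List.replicate (t.length+1) 0), 0, PySem.Set.empty)).1 ∧
      pvGood s t k 0
        ((List.range k).foldl (fun st i => (List.range t.length).foldl (pvStepA s t x i) st)
          (List.replicate (s.length+1) (List.replicate (t.length+1) 0), 0, PySem.Set.empty)).1 ∧
      ((List.range k).foldl (fun st i => (List.range t.length).foldl (pvStepA s t x i) st)
          (List.replicate (s.length+1) (List.replicate (t.length+1) 0), 0, PySem.Set.empty)).2.2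
        = (List.range k).foldl (fun acc i => (List.range t.length).foldl (pvStepB s t x i) acc)
            PySem.Set.empty := by
  intro k
  induction k with
  | zero =>
    intro _
    simp only [List.range_zero, List.foldl_nil]
    refine ⟨⟨by simp, ?_⟩, ?_, by trivial⟩
    · intro r hr
      rw [List.eq_of_mem_replicate hr]
      simp
    · intro a b ha hb
      unfold pvEntry
      have h0 : (List.replicate (s.length+1) (List.replicate (t.length+1) (0:Int))).getD a [] = if a ≤ s.length then List.replicate (t.length+1) 0 else [] := by
        by_cases h : a ≤ s.length
        · rw [if_pos h, List.getD_eq_getElem?_getD, List.getElem?_eq_getElem (by simpa using (by omega : a < s.length + 1))]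
          simp
        · rw [if_neg h, List.getD_eq_getElem?_getD, List.getElem?_eq_none (by simpa using (by omega : s.length + 1 ≤ a))]
          rfl
      rw [h0, if_pos ha]
      have h1 : (List.replicate (t.length+1) (0:Int)).getD b 0 = 0 := by
        rcases Nat.lt_or_ge b (t.length+1) with h | h
        · rw [List.getD_eq_getElem?_getD, List.getElem?_eq_getElem (by simpa using h)]; simp
        · rw [List.getD_eq_getElem?_getD, List.getElem?_eq_none (by simpa using h)]; rfl
      rw [h1]
      by_cases h2 : a ≤ 0 ∨ (a = 1 ∧ b ≤ 0)
      · rw [if_pos h2]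
        rcases h2 with h | ⟨h, h'⟩
        · have : a = 0 := by omega
          subst this; simp [pvExt]
        · subst h
          have : b = 0 := by omega
          subst this; simp [pvExt]
      · rw [if_neg h2]
  | succ k ih =>
    intro hk
    obtain ⟨hs, hg, hacc⟩ := ih (by omega)
    rw [List.range_succ, List.foldl_append, List.foldl_append]
    simp only [List.foldl_cons, List.foldl_nil]
    set st := (List.range k).foldl (fun st i => (List.range t.length).foldl (pvStepA s t x i) st)
      (List.replicate (s.length+1) (List.replicate (t.length+1) (0:Int)), (0:Int), (PySem.Set.empty : List String)) with hst
    have hinner := pv_inner s t x k (by omega) t.length le_rfl st.1 st.2.1 st.2.2 hs hg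
    refine ⟨hinner.1, pvGood_next s t k _ hinner.2.1, ?_⟩
    rw [← hacc]
    exact hinner.2.2

-- ===== VERDICT (by name: the statement is the Claim_ definition above) =====
theorem topcs_spec : Claim_equal_topcs := by
  intro S T x _
  unfold Spec_topcs topcs topcs_alt
  exact (pv_outer S.toList T.toList x S.toList.length le_rfl).2.2
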